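-- pv_equiv track=rewrite | github.com/Auniik/OpenClaw-WS | skills/dse-trading/scripts/market-close/bundler.py | build_shortlist
-- ===== SOURCE A (Python) =====
-- def build_shortlist(holdings: set[str], top_change: list[str], top_value: list[str], top_volume: list[str]) -> dict[str, list[str]]:
--     sources: dict[str, set[str]] = {}
--
--     def add(code: str, src: str) -> None:
--         sources.setdefault(code, set()).add(src)
--
--     for c in holdings:
--         add(c, "holding")
--     for c in top_change:
--         add(c, "top_change")
--     for c in top_value:
--         add(c, "top_value")
--     for c in top_volume:
--         add(c, "top_volume")
--
--     return {c: sorted(list(srcs)) for c, srcs in sorted(sources.items())}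
-- ===== SOURCE B (Python) =====
-- def build_shortlist(holdings, top_change, top_value, top_volume):
--     tagged = [(set(holdings), "holding"), (set(top_change), "top_change"),
--               (set(top_value), "top_value"), (set(top_volume), "top_volume")]
--     codes = sorted({*holdings, *top_change, *top_value, *top_volume})
--     return {c: [src for s, src in tagged if c in s] for c in codes}
-- ===== Notes on version B (the rewrite author's own statement) =====
-- stated objective: simpler
-- what changed: Replaced A's dict-of-sets accumulation (with a per-entry sort of each set) by building the sorted set of all codes once and emitting, for each code, the tag list via a fixed-order membership scan of the four tagged inputs.
import Mathlib
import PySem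

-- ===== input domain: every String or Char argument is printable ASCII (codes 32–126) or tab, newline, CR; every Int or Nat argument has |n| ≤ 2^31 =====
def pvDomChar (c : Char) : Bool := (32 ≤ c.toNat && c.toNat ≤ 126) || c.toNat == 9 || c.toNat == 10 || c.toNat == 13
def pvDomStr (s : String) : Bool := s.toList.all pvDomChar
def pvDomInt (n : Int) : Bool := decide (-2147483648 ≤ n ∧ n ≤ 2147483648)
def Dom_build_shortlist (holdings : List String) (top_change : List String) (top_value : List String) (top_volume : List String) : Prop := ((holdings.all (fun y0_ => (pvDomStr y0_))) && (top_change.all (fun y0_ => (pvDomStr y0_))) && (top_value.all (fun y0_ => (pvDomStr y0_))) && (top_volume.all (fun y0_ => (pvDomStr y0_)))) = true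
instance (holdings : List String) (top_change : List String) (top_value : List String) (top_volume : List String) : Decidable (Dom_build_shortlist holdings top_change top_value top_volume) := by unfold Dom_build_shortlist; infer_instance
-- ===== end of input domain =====

-- B replaces A's dict-of-sets accumulation with per-entry sorts by one sorted set of all
-- codes plus a fixed-order membership scan over the four tagged inputs (objective: simpler).


-- ===== PORT A =====
-- A's inner `add`: sources.setdefault(code, set()).add(src). Overwriting mutates the
-- existing set in place (key keeps its position), so it is exactly
-- insert code ((getD code ∅).add src).
def bsAdd (sources : PySem.Dict String (PySem.Set String)) (code : String) (src : String) :
    PySem.Dict String (PySem.Set String) :=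
  sources.insert code (PySem.Set.add (sources.getD code PySem.Set.empty) src)

def build_shortlist (holdings : List String) (top_change : List String) (top_value : List String) (top_volume : List String) : List (String × List String) :=
  let s0 : PySem.Dict String (PySem.Set String) := PySem.Dict.empty
  let s1 := holdings.foldl (fun d c => bsAdd d c "holding") s0
  let s2 := top_change.foldl (fun d c => bsAdd d c "top_change") s1
  let s3 := top_value.foldl (fun d c => bsAdd d c "top_value") s2
  let s4 := top_volume.foldl (fun d c => bsAdd d c "top_volume") s3
  -- sorted(sources.items()): dict keys are unique, so Python's tuple sort never compares
  -- the set values and equals the sort by key; sorted(list(srcs)) is a keyless sort of a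
  -- set, whose result does not depend on the set's iteration order.
  (PySem.List.sorted s4.items (fun p => p.1) false).map
    (fun p => (p.1, PySem.List.sorted p.2 (fun x => x) false))

-- ===== PORT B =====
def build_shortlist_alt (holdings : List String) (top_change : List String) (top_value : List String) (top_volume : List String) : List (String × List String) :=
  let tagged : List (PySem.Set String × String) :=
    [(PySem.Set.ofList holdings, "holding"), (PySem.Set.ofList top_change, "top_change"),
     (PySem.Set.ofList top_value, "top_value"), (PySem.Set.ofList top_volume, "top_volume")]
  -- {*holdings, *top_change, *top_value, *top_volume} adds the four lists' elements in order
  let codes := PySem.List.sorted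
    (PySem.Set.ofList (holdings ++ top_change ++ top_value ++ top_volume)) (fun x => x) false
  codes.map (fun c => (c, (tagged.filter (fun p => PySem.Set.contains p.1 c)).map (fun p => p.2)))

-- ===== PRECONDITION & SPEC =====
def Spec_build_shortlist (holdings : List String) (top_change : List String) (top_value : List String) (top_volume : List String) (out : List (String × List String)) : Prop := out = build_shortlist_alt holdings top_change top_value top_volume
instance (holdings : List String) (top_change : List String) (top_value : List String) (top_volume : List String) (out : List (String × List String)) : Decidable (Spec_build_shortlist holdings top_change top_value top_volume out) := by unfold Spec_build_shortlist; infer_instance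

-- ===== CLAIM (what is proved, stated in full; the proofs are below) =====
def Claim_equal_build_shortlist : Prop := ∀ (holdings : List String) (top_change : List String) (top_value : List String) (top_volume : List String), Dom_build_shortlist holdings top_change top_value top_volume → Spec_build_shortlist holdings top_change top_value top_volume (build_shortlist holdings top_change top_value top_volume)

-- ===== LEMMAS AND PROOFS =====

-- the per-tag accumulation fold, characterised pointwise
theorem getD_fold_bsAdd (L : List String) (t : String)
    (d : PySem.Dict String (PySem.Set String)) (x : String) :
    (L.foldl (fun d c => bsAdd d c t) d).getD x PySem.Set.empty
      = if x ∈ L then PySem.Set.add (d.getD x PySem.Set.empty) t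
        else d.getD x PySem.Set.empty := by
  induction L generalizing d with
  | nil => simp
  | cons c L ih =>
    simp only [List.foldl_cons]
    rw [ih]
    by_cases hx : x = c <;> by_cases hm : x ∈ L <;>
      simp [bsAdd, PySem.Dict.getD_insert, hx, hm]

theorem keys_fold_bsAdd (L : List String) (t : String)
    (d : PySem.Dict String (PySem.Set String)) :
    (L.foldl (fun d c => bsAdd d c t) d).keys = PySem.Set.update d.keys L :=
  PySem.Dict.keys_foldl_insert L (fun d c => PySem.Set.add (d.getD c PySem.Set.empty) t) d

theorem build_shortlist_eq_alt (h tc tv tvol : List String) :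
    build_shortlist h tc tv tvol = build_shortlist_alt h tc tv tvol := by
  simp only [build_shortlist, build_shortlist_alt]
  set d4 := (tvol.foldl (fun d c => bsAdd d c "top_volume")
    (tv.foldl (fun d c => bsAdd d c "top_value")
      (tc.foldl (fun d c => bsAdd d c "top_change")
        (h.foldl (fun d c => bsAdd d c "holding") PySem.Dict.empty)))) with hd4
  have hkeys : d4.keys = PySem.Set.ofList (h ++ tc ++ tv ++ tvol) := by
    rw [hd4]
    simp [keys_fold_bsAdd, PySem.Set.update, PySem.Set.ofList, List.foldl_append]
  have hnodup : d4.keys.Nodup := by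
    rw [hkeys]; exact PySem.Set.nodup_ofList _
  have hitems : d4.items = d4.keys.map (fun k => (k, d4.getD k PySem.Set.empty)) :=
    PySem.Dict.items_eq_map_keys d4 hnodup PySem.Set.empty
  have hval : ∀ c : String, PySem.List.sorted (d4.getD c PySem.Set.empty) (fun x => x) false
      = (([(PySem.Set.ofList h,"holding"),(PySem.Set.ofList tc,"top_change"),
           (PySem.Set.ofList tv,"top_value"),(PySem.Set.ofList tvol,"top_volume")] :
          List (PySem.Set String × String)).filter
            (fun p => PySem.Set.contains p.1 c)).map (fun p => p.2) := by
    intro c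
    rw [hd4, getD_fold_bsAdd, getD_fold_bsAdd, getD_fold_bsAdd, getD_fold_bsAdd]
    simp only [PySem.Dict.getD_empty]
    by_cases h1 : c ∈ h <;> by_cases h2 : c ∈ tc <;> by_cases h3 : c ∈ tv <;>
      by_cases h4 : c ∈ tvol <;>
      simp [h1, h2, h3, h4, PySem.Set.contains, PySem.Set.mem_ofList] <;>
      (apply PySem.List.sorted_eq_self_of_pairwise; simp; try decide)
  have hsort : PySem.List.sorted d4.items (fun p => p.1) false
      = (PySem.List.sorted (d4.keys) (fun x => x) false).map
          (fun k => (k, d4.getD k PySem.Set.empty)) := by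
    apply PySem.List.sorted_eq_of_perm_of_pairwise_lt
    · rw [hitems]
      exact (PySem.List.sorted_perm _ _ _).map _
    · rw [List.pairwise_map, hkeys]
      exact PySem.List.sorted_ofList_pairwise_lt _
  rw [hsort, hkeys]
  simp only [List.map_map]
  apply List.map_congr_left
  intro c hc
  simp only [Function.comp_apply]
  rw [hval c]

-- ===== VERDICT (by name: the statement is the Claim_ definition above) =====
theorem build_shortlist_spec : Claim_equal_build_shortlist := by
  intro h tc tv tvol _
  exact build_shortlist_eq_alt h tc tv tvol
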